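-- pv_equiv track=rewrite | github.com/LordBrom/programming-challenges | adventofcode/2018/day20.py | getSplitPos
-- ===== SOURCE A (Python) =====
-- def getSplitPos(path):
--     openCount = 0
--     result = []
--     for i in range(len(path)):
--
--         if path[i] == ")":
--             openCount -= 1
--         elif path[i] == "(":
--             openCount += 1
--         elif openCount == 0 and path[i] == '|':
--             result.append(i)
--
--     return result
-- ===== SOURCE B (Python) =====
-- def getSplitPos(path):
--     # skip-based scan: the top-level cursor jumps over each nested segment in an
--     # inner matching scan, so '|' is collected only while standing at top level
--     result = []
--     i, n = 0, len(path)
--     while i < n: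
--         c = path[i]
--         if c == "|":
--             result.append(i)
--             i += 1
--         elif c in "()":
--             depth = 1 if c == "(" else -1
--             i += 1
--             while i < n and depth != 0:
--                 depth += (path[i] == "(") - (path[i] == ")")
--                 i += 1
--         else:
--             i += 1
--     return result
-- ===== Notes on version B (the rewrite author's own statement) =====
-- stated objective: alternative
-- what changed: Replaces A's single pass that updates a depth counter at every character by a two-level skip scan: a top-level cursor that collects '|' directly and, on meeting a parenthesis, runs an inner scan jumping the cursor past the whole nested (or dangling) segment.
import Mathlib
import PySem

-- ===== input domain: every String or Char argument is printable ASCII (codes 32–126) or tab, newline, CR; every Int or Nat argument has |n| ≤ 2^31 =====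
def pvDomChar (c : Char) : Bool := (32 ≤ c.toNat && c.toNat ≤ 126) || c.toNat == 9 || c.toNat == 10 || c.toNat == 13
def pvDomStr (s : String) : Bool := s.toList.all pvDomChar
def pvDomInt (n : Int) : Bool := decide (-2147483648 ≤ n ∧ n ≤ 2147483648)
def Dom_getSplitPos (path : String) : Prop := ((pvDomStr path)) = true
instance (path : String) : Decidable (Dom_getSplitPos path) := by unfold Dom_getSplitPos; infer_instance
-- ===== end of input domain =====

-- B replaces A's per-character depth-counter pass by a two-level skip scan (the top-level
-- cursor jumps over whole nested segments via an inner matching scan); same O(n) cost.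


-- ===== PORT A =====
-- A's loop body: branch order as in the Python (')' first, then '(', then the top-level '|' check).
def stepA (st : Int × List Int) (ic : Int × Char) : Int × List Int :=
  if ic.2 = ')' then (st.1 - 1, st.2)
  else if ic.2 = '(' then (st.1 + 1, st.2)
  else if st.1 = 0 ∧ ic.2 = '|' then (st.1, st.2 ++ [ic.1])
  else st

def getSplitPos (path : String) : List Int :=
  ((PySem.List.enumerate path.toList 0).foldl stepA (0, [])).2

-- ===== PORT B =====
-- delta of one character inside B's inner scan: (path[i] == "(") - (path[i] == ")")
def deltaB (c : Char) : Int := (if c = '(' then 1 else 0) - (if c = ')' then 1 else 0)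

-- B's inner while loop: consume characters while depth ≠ 0; returns the remaining
-- characters and how many were consumed.
def skipB (d : Int) : List Char → List Char × Nat
  | [] => ([], 0)
  | c :: rest =>
      if d = 0 then (c :: rest, 0)
      else
        let p := skipB (d + deltaB c) rest
        (p.1, p.2 + 1)

theorem skipB_len (d : Int) (cs : List Char) : (skipB d cs).1.length ≤ cs.length := by
  induction cs generalizing d with
  | nil => simp [skipB]
  | cons c rest ih =>
      by_cases h : d = 0
      · simp [skipB, h]
      · simpa [skipB, h] using Nat.le_succ_of_le (ih (d + deltaB c))

-- B's outer while loop over the remaining characters, carrying the cursor i.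
def goB : List Char → Int → List Int
  | [], _ => []
  | c :: rest, i =>
      if c = '|' then i :: goB rest (i + 1)
      else if c = '(' ∨ c = ')' then
        let p := skipB (deltaB c) rest
        goB p.1 (i + 1 + (p.2 : Int))
      else goB rest (i + 1)
termination_by cs _ => cs.length
decreasing_by
  · simp
  · exact Nat.lt_succ_of_le (skipB_len _ rest)
  · simp

def getSplitPos_alt (path : String) : List Int := goB path.toList 0

-- ===== PRECONDITION & SPEC =====
def Spec_getSplitPos (path : String) (out : List Int) : Prop := out = getSplitPos_alt path
instance (path : String) (out : List Int) : Decidable (Spec_getSplitPos path out) := by unfold Spec_getSplitPos; infer_instance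

-- ===== CLAIM (what is proved, stated in full; the proofs are below) =====
def Claim_equal_getSplitPos : Prop := ∀ (path : String), Dom_getSplitPos path → Spec_getSplitPos path (getSplitPos path)

-- ===== LEMMAS AND PROOFS =====
-- With nonzero depth, A's step only moves the counter by the character's delta.
theorem stepA_ne (d : Int) (acc : List Int) (i : Int) (c : Char) (hd : d ≠ 0) :
    stepA (d, acc) (i, c) = (d + deltaB c, acc) := by
  simp only [stepA, deltaB]
  split_ifs <;> simp_all <;> omega

theorem skipB_zero (cs : List Char) : skipB 0 cs = (cs, 0) := by
  cases cs <;> simp [skipB]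

-- A's fold from a nonzero depth collects nothing until the depth returns to 0,
-- i.e. it equals the fold restarted at depth 0 on B's skip remainder.
theorem skip_lemma (cs : List Char) (d : Int) (i : Int) (acc : List Int) (hd : d ≠ 0) :
    ((PySem.List.enumerate cs i).foldl stepA (d, acc)).2
      = ((PySem.List.enumerate (skipB d cs).1 (i + ((skipB d cs).2 : Int))).foldl stepA (0, acc)).2 := by
  induction cs generalizing d i with
  | nil => simp [skipB, PySem.List.enumerate_nil]
  | cons c rest ih =>
      simp only [skipB, hd, PySem.List.enumerate_cons, List.foldl_cons,
        stepA_ne d acc i c hd]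
      by_cases h0 : d + deltaB c = 0
      · simp [h0, skipB_zero]
      · have := ih (d + deltaB c) (i + 1) h0
        rw [this]
        congr 2
        push_cast
        ring
-- The main invariant: A's fold at depth 0 appends exactly B's outer-loop output.
theorem main_lemma (n : Nat) : ∀ (cs : List Char), cs.length ≤ n → ∀ (i : Int) (acc : List Int),
    ((PySem.List.enumerate cs i).foldl stepA (0, acc)).2 = acc ++ goB cs i := by
  induction n with
  | zero =>
      intro cs h i acc
      have : cs = [] := List.eq_nil_of_length_eq_zero (Nat.le_zero.mp h)
      simp [this, goB, PySem.List.enumerate_nil]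
  | succ n ih =>
      intro cs h i acc
      match cs with
      | [] => simp [goB, PySem.List.enumerate_nil]
      | c :: rest =>
          have hrest : rest.length ≤ n := Nat.le_of_succ_le_succ h
          simp only [PySem.List.enumerate_cons, List.foldl_cons]
          by_cases hb : c = '|'
          · have : stepA (0, acc) (i, c) = (0, acc ++ [i]) := by simp [stepA, hb]
            rw [this, ih rest hrest (i + 1) (acc ++ [i])]
            simp [goB, hb]
          · by_cases hp : c = '(' ∨ c = ')'
            · have hstep : stepA (0, acc) (i, c) = (deltaB c, acc) := by
                rcases hp with h | h <;> simp [stepA, deltaB, h]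
              have hdne : deltaB c ≠ 0 := by
                rcases hp with h | h <;> simp [deltaB, h]
              rw [hstep, skip_lemma rest (deltaB c) (i + 1) acc hdne,
                ih (skipB (deltaB c) rest).1
                  (Nat.le_trans (skipB_len (deltaB c) rest) hrest)]
              have : ¬ c = '|' := hb
              simp only [goB, if_neg this, if_pos hp]
            · have h1 : ¬ c = ')' := fun hc => hp (Or.inr hc)
              have h2 : ¬ c = '(' := fun hc => hp (Or.inl hc)
              have : stepA (0, acc) (i, c) = (0, acc) := by simp [stepA, h1, h2, hb]
              rw [this, ih rest hrest (i + 1) acc]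
              simp [goB, hb, hp]

-- ===== VERDICT (by name: the statement is the Claim_ definition above) =====
theorem getSplitPos_spec : Claim_equal_getSplitPos := by
  intro path _
  unfold Spec_getSplitPos getSplitPos getSplitPos_alt
  simpa using main_lemma path.toList.length path.toList (Nat.le_refl _) 0 []
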